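-- pv_equiv track=rewrite | github.com/SVCE-ACM/A-December-Of-Algorithms-2023 | December 04/python3_lakshminarayanans_mirrormagic.py | find_palindromic_substring
-- ===== SOURCE A (Python) =====
-- def find_palindromic_substring(name):
--     """
--     Find the smallest palindromic substring in a given string.
--
--     Parameters:
--         name (str): The input string.
--
--     Returns:
--         str: The smallest palindromic substring, or "Error" if none is found.
--     """
--     length = len(name)
--     possibilities = []
--
--     for i in range(length):
--         for j in range(i + 1, length + 1):
--             substring = name[i:j]
--             if substring == substring[::-1] and len(substring) > 1:
--                 possibilities.append(substring)
--
--     if len(possibilities) < 1: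
--         return "Error"
--     else:
--         return min(possibilities)
-- ===== SOURCE B (Python) =====
-- def find_palindromic_substring(name):
--     """Center-expansion rewrite: enumerate every palindromic substring once
--     (O(1) extension work per palindrome) and keep a running lexicographic
--     minimum; same result as the brute-force original."""
--     n = len(name)
--     best = None
--     for center in range(2 * n - 1):
--         l = center // 2
--         r = l + center % 2
--         while l >= 0 and r < n and name[l] == name[r]:
--             if r > l:
--                 cand = name[l:r + 1]
--                 if best is None or cand < best:
--                     best = cand
--             l -= 1
--             r += 1
--     return best if best is not None else "Error"
-- ===== Notes on version B (the rewrite author's own statement) =====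
-- stated objective: faster
-- what changed: Replaced the enumerate-all-substrings-and-reverse-check brute force by center expansion: each palindromic substring is generated once by extending outward from its center (O(1) check per step), with a running lexicographic minimum instead of building a list.
import Mathlib
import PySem

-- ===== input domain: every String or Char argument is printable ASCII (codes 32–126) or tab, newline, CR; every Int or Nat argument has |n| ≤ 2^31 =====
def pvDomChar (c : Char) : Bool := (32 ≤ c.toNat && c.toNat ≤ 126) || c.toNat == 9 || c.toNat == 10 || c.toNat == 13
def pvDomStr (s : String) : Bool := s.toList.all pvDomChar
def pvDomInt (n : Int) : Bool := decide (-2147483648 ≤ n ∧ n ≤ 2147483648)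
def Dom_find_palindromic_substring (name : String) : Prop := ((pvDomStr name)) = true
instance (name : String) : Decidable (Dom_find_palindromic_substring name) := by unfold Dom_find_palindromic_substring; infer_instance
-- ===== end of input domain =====

-- B replaces the O(n^3) all-substrings brute force by center expansion with a running
-- lexicographic minimum; a timing run measured B faster; return values proved equal.


-- ===== PORT A =====
def find_palindromic_substring (name : String) : String :=
  let s := name.toList
  let length : Int := s.length
  let possibilities : List (List Char) :=
    (PySem.List.pyRange 0 length 1).foldl (fun acc i =>
      (PySem.List.pyRange (i + 1) (length + 1) 1).foldl (fun acc2 j =>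
        let substring := PySem.List.slice s (some i) (some j)
        if substring = substring.reverse ∧ 1 < substring.length then acc2 ++ [substring]
        else acc2) acc) []
  if possibilities.length < 1 then "Error"
  else
    match PySem.List.min? possibilities (fun x => x) with
    | some m => String.ofList m
    | none => "Error"   -- unreachable: guarded by the emptiness test above

-- ===== PORT B =====
-- the `while l >= 0 and r < n and name[l] == name[r]` loop of Source B
def pvExpand (s : List Char) (l r : Int) (best : Option (List Char)) : Option (List Char) :=
  if h : 0 ≤ l ∧ r < (s.length : Int) ∧ PySem.List.pyGetD s l ' ' = PySem.List.pyGetD s r ' ' then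
    let best' :=
      if l < r then
        let cand := PySem.List.slice s (some l) (some (r + 1))
        match best with
        | none => some cand
        | some b => if cand < b then some cand else some b
      else best
    pvExpand s (l - 1) (r + 1) best'
  else best
termination_by (l + 1).toNat
decreasing_by omega

def find_palindromic_substring_alt (name : String) : String :=
  let s := name.toList
  let n : Int := s.length
  let best := (PySem.List.pyRange 0 (2 * n - 1) 1).foldl (fun best c =>
    pvExpand s (PySem.Int.floordiv c 2) (PySem.Int.floordiv c 2 + PySem.Int.mod c 2) best) none
  match best with
  | some b => String.ofList b
  | none => "Error"

-- ===== PRECONDITION & SPEC =====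
def Spec_find_palindromic_substring (name : String) (out : String) : Prop := out = find_palindromic_substring_alt name
instance (name : String) (out : String) : Decidable (Spec_find_palindromic_substring name out) := by unfold Spec_find_palindromic_substring; infer_instance

-- ===== CLAIM (what is proved, stated in full; the proofs are below) =====
def Claim_equal_find_palindromic_substring : Prop := ∀ (name : String), Dom_find_palindromic_substring name → Spec_find_palindromic_substring name (find_palindromic_substring name)

-- ===== LEMMAS AND PROOFS =====

-- s[a:b] on the char list
def islice (s : List Char) (a b : Int) : List Char := PySem.List.slice s (some a) (some b)

-- the palindromic substrings of length > 1: the common candidate set of both programs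
def isCand (s x : List Char) : Prop := x = x.reverse ∧ 1 < x.length ∧ x <:+: s

-- the running-minimum update of Source B, isolated
def pvStep (b : Option (List Char)) (c : List Char) : Option (List Char) :=
  match b with
  | none => some c
  | some x => if c < x then some c else some x

-- the candidates pvExpand inspects, as a list (proof-side mirror of the loop)
def pvProduced (s : List Char) (l r : Int) : List (List Char) :=
  if 0 ≤ l ∧ r < (s.length : Int) ∧ PySem.List.pyGetD s l ' ' = PySem.List.pyGetD s r ' ' then
    (if l < r then [PySem.List.slice s (some l) (some (r + 1))] else []) ++ pvProduced s (l - 1) (r + 1)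
  else []
termination_by (l + 1).toNat
decreasing_by omega

lemma pvExpand_eq_foldl (s : List Char) (l r : Int) (best : Option (List Char)) :
    pvExpand s l r best = (pvProduced s l r).foldl pvStep best := by
  fun_induction pvExpand s l r best with
  | case1 l r best h best' ih =>
    rw [pvProduced, if_pos h, List.foldl_append, ih]
    congr 1
    by_cases hlr : l < r
    · simp only [best']
      rw [dif_pos hlr, if_pos hlr]
      simp only [List.foldl_cons, List.foldl_nil]
      cases best <;> rfl
    · simp only [best']
      rw [dif_neg hlr, if_neg hlr]
      rfl
  | case2 l r best h =>
    rw [pvProduced, if_neg h, List.foldl_nil]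

lemma foldl_pvStep_some (t : List (List Char)) (x : List Char) :
    t.foldl pvStep (some x) = some (t.foldl min x) := by
  have hs : ∀ (x c : List Char), pvStep (some x) c = some (min x c) := by
    intro x c
    rcases lt_or_ge c x with h | h
    · simp [pvStep, h, min_def, not_le.2 h]
    · simp [pvStep, not_lt.2 h, min_eq_left h]
  induction t generalizing x with
  | nil => simp
  | cons c t ih => rw [List.foldl_cons, hs, ih, List.foldl_cons]

lemma min?_inst (l : List (List Char)) :
    PySem.List.min? l (fun y => y) = @PySem.List.min? _ _ List.instLinearOrder.toLT LinearOrder.toDecidableLT l (fun y => y) := by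
  congr 1

lemma foldl_pvStep_none_eq_min? (t : List (List Char)) :
    t.foldl pvStep none = PySem.List.min? t (fun y => y) := by
  rw [min?_inst]
  cases t with
  | nil => exact ((PySem.List.min?_eq_none_iff ([] : List (List Char)) (fun y => y)).2 rfl).symm
  | cons c t =>
    have h1 : pvStep none c = some c := rfl
    rw [PySem.List.min?_id_cons, List.foldl_cons, h1, foldl_pvStep_some]

lemma foldl_flat (g : Int → List (List Char)) (cs : List Int) (b : Option (List Char)) :
    cs.foldl (fun b c => (g c).foldl pvStep b) b = (cs.flatMap g).foldl pvStep b := by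
  induction cs generalizing b with
  | nil => simp
  | cons c cs ih => rw [List.flatMap_cons, List.foldl_append, List.foldl_cons, ih]

lemma min?_congr_mem (l1 l2 : List (List Char)) (h : ∀ x, x ∈ l1 ↔ x ∈ l2) :
    PySem.List.min? l1 (fun y => y) = PySem.List.min? l2 (fun y => y) := by
  cases h1 : PySem.List.min? l1 (fun y => y) with
  | none =>
    cases h2 : PySem.List.min? l2 (fun y => y) with
    | none => rfl
    | some m2 =>
      have : m2 ∈ l1 := (h m2).2 (PySem.List.min?_mem h2)
      rw [(PySem.List.min?_eq_none_iff l1 (fun y => y)).1 h1] at this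
      exact absurd this (List.not_mem_nil)
  | some m1 =>
    cases h2 : PySem.List.min? l2 (fun y => y) with
    | none =>
      have : m1 ∈ l2 := (h m1).1 (PySem.List.min?_mem h1)
      rw [(PySem.List.min?_eq_none_iff l2 (fun y => y)).1 h2] at this
      exact absurd this (List.not_mem_nil)
    | some m2 =>
      have ha : m1 ≤ m2 := by
        simpa using PySem.List.min?_isMin (min?_inst l1 ▸ h1) m2 ((h m2).2 (PySem.List.min?_mem h2))
      have hb : m2 ≤ m1 := by
        simpa using PySem.List.min?_isMin (min?_inst l2 ▸ h2) m1 ((h m1).1 (PySem.List.min?_mem h1))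
      rw [le_antisymm ha hb]

-- decomposition of s[l:r+1] used by the expansion invariant
lemma islice_decomp (s : List Char) (l r : Int) (h0 : 0 ≤ l) (hlr : l < r) (hr : r < (s.length : Int)) :
    islice s l (r + 1) =
      PySem.List.pyGetD s l ' ' :: islice s (l + 1) r ++ [PySem.List.pyGetD s r ' '] := by
  have hl : l.toNat < s.length := by omega
  have hr : r.toNat < s.length := by omega
  rw [islice, islice, PySem.List.slice_toNat s h0 (by omega), PySem.List.slice_toNat s (by omega) (by omega),
      PySem.List.pyGetD_eq_getElem s ' ' h0 (by omega), PySem.List.pyGetD_eq_getElem s ' ' (by omega) (by omega)]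
  have e1 : (r + 1).toNat - l.toNat = (r.toNat - (l.toNat + 1)) + 1 + 1 := by omega
  have e2 : (l + 1).toNat = l.toNat + 1 := by omega
  rw [e1, e2, ← List.getElem_cons_drop hl, List.take_succ_cons]
  congr 1
  rw [List.take_add_one]
  congr 1
  rw [List.getElem?_drop]
  have e4 : l.toNat + 1 + (r.toNat - (l.toNat + 1)) = r.toNat := by omega
  rw [e4, List.getElem?_eq_getElem hr]
  rfl

lemma islice_single (s : List Char) (l : Int) (h0 : 0 ≤ l) (hl : l < (s.length : Int)) :
    islice s l (l + 1) = [PySem.List.pyGetD s l ' '] := by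
  have hlt : l.toNat < s.length := by omega
  have h1 : (l + 1).toNat - l.toNat = 1 := by omega
  rw [islice, PySem.List.slice_toNat s h0 (by omega), h1,
      PySem.List.pyGetD_eq_getElem s ' ' h0 hl]
  simp [List.take_one, List.head?_drop, hlt]

lemma islice_empty (s : List Char) (a b : Int) (h0 : 0 ≤ a) (hb0 : 0 ≤ b) (hba : b ≤ a) :
    islice s a b = [] := by
  rw [islice, PySem.List.slice_toNat s h0 hb0]
  have : b.toNat - a.toNat = 0 := by omega
  simp [this]

lemma islice_infix (s : List Char) (a b : Int) (h0 : 0 ≤ a) (hb0 : 0 ≤ b) :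
    islice s a b <:+: s := by
  rw [islice, PySem.List.slice_toNat s h0 hb0]
  exact (List.take_prefix _ _).isInfix.trans (List.drop_suffix _ _).isInfix

-- a palindrome read at mirrored positions gives equal characters
lemma pal_getElem? (x : List Char) (hpal : x = x.reverse) (k1 k2 : Nat)
    (hk : k1 + k2 + 1 = x.length) : x[k1]? = x[k2]? := by
  have hk1 : k1 < x.length := by omega
  conv_lhs => rw [hpal]
  rw [List.getElem?_reverse (by simpa using hk1)]
  congr 1
  omega

lemma islice_getElem? (s : List Char) (a b : Int) (h0 : 0 ≤ a) (hb : 0 ≤ b)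
    (k : Nat) (hk : k < b.toNat - a.toNat) :
    (islice s a b)[k]? = s[a.toNat + k]? := by
  rw [islice, PySem.List.slice_toNat s h0 hb, List.getElem?_take, if_pos hk, List.getElem?_drop]

lemma islice_length (s : List Char) (a b : Int) (h0 : 0 ≤ a) (hb : 0 ≤ b)
    (hbs : b ≤ (s.length : Int)) :
    (islice s a b).length = b.toNat - a.toNat := by
  rw [islice, PySem.List.slice_toNat s h0 hb, List.length_take, List.length_drop]
  omega

-- a palindromic substring of length > 1 is a slice s[i:j] with 0 ≤ i, i+2 ≤ j ≤ len(s)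
lemma cand_rep (s x : List Char) (h : isCand s x) :
    ∃ i j : Int, 0 ≤ i ∧ i + 2 ≤ j ∧ j ≤ (s.length : Int) ∧ islice s i j = x := by
  obtain ⟨hpal, hlen, u, v, huv⟩ := h
  have hsl : s.length = u.length + x.length + v.length := by
    rw [← huv]
    simp
    omega
  refine ⟨(u.length : Int), (u.length : Int) + (x.length : Int), by omega, by omega, by omega, ?_⟩
  rw [islice, PySem.List.slice_natCast_add s u.length x.length, ← huv, List.append_assoc,
      List.drop_left, List.take_left]

-- membership in A's possibilities list
lemma memA (s : List Char) (x : List Char) :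
    x ∈ (PySem.List.pyRange 0 (s.length : Int) 1).foldl (fun acc i =>
      (PySem.List.pyRange (i + 1) ((s.length : Int) + 1) 1).foldl (fun acc2 j =>
        if (islice s i j) = (islice s i j).reverse ∧ 1 < (islice s i j).length
        then acc2 ++ [islice s i j] else acc2) acc) []
    ↔ isCand s x := by
  rw [List.foldl_ext _ (fun (acc : List (List Char)) (i : Int) =>
        acc ++ ((PySem.List.pyRange (i + 1) ((s.length : Int) + 1) 1).filter (fun j =>
          decide ((islice s i j) = (islice s i j).reverse ∧ 1 < (islice s i j).length))).map
            (fun j => islice s i j)) []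
      (by
        intro acc i _
        simp only []
        rw [← PySem.List.foldl_append_if _ (fun j => islice s i j) _ acc]
        simp only [decide_eq_true_eq]),
      PySem.List.foldl_append_eq_flatMap, List.nil_append, List.mem_flatMap]
  constructor
  · rintro ⟨i, hi, hx⟩
    rw [PySem.List.mem_pyRange_one] at hi
    rw [List.mem_map] at hx
    obtain ⟨j, hj, hxe⟩ := hx
    rw [List.mem_filter, PySem.List.mem_pyRange_one, decide_eq_true_eq] at hj
    obtain ⟨⟨hji, hjn⟩, hpal, hlen⟩ := hj
    subst hxe
    exact ⟨hpal, hlen, islice_infix s i j (by omega) (by omega)⟩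
  · intro hx
    obtain ⟨i, j, h0, hij, hj, hrep⟩ := cand_rep s x hx
    refine ⟨i, ?_, ?_⟩
    · rw [PySem.List.mem_pyRange_one]
      constructor
      · omega
      · have := congrArg List.length hrep
        rw [islice_length s i j h0 (by omega) hj] at this
        have hxl := hx.2.1
        omega
    · rw [List.mem_map]
      refine ⟨j, ?_, hrep⟩
      rw [List.mem_filter, PySem.List.mem_pyRange_one, decide_eq_true_eq]
      have hxl := hx.2.1
      refine ⟨⟨?_, by omega⟩, ?_, ?_⟩
      · omega
      · rw [hrep]
        exact hx.1
      · rw [hrep]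
        omega

-- soundness: everything pvExpand inspects is a palindromic substring of length > 1
lemma produced_sound (s : List Char) (l r : Int)
    (hl : -1 ≤ l) (hr : r ≤ (s.length : Int)) (hlr : l ≤ r)
    (hpal : islice s (l + 1) r = (islice s (l + 1) r).reverse) :
    ∀ x ∈ pvProduced s l r, isCand s x := by
  intro x hx
  rw [pvProduced] at hx
  by_cases h : 0 ≤ l ∧ r < (s.length : Int) ∧ PySem.List.pyGetD s l ' ' = PySem.List.pyGetD s r ' '
  · rw [if_pos h] at hx
    obtain ⟨h0l, hrn, heq⟩ := h
    have hpal' : islice s l (r + 1) = (islice s l (r + 1)).reverse := by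
      rcases lt_or_eq_of_le hlr with hlt | heqlr
      · rw [islice_decomp s l r h0l hlt hrn, heq]
        simp [← hpal]
      · rw [← heqlr, islice_single s l h0l (by omega)]
        simp
    rcases List.mem_append.1 hx with hx1 | hx2
    · have hl_r : l < r := by
        by_contra hcon
        simp [if_neg hcon] at hx1
      rw [if_pos hl_r, List.mem_singleton] at hx1
      subst hx1
      refine ⟨hpal', ?_, islice_infix s l (r + 1) h0l (by omega)⟩
      rw [show PySem.List.slice s (some l) (some (r + 1)) = islice s l (r + 1) from rfl,
          islice_length s l (r + 1) h0l (by omega) (by omega)]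
      omega
    · exact produced_sound s (l - 1) (r + 1) (by omega) (by omega) (by omega)
        (by rw [(by ring : l - 1 + 1 = l)]; exact hpal') x hx2
  · rw [if_neg h] at hx
    simp at hx
termination_by (l + 1).toNat
decreasing_by omega

-- symmetry of a palindromic slice: chars at mirrored positions agree
lemma pal_sym (s : List Char) (i j l r : Int)
    (hij : i + 2 ≤ j) (h0 : 0 ≤ i) (hj : j ≤ (s.length : Int))
    (hpal : islice s i j = (islice s i j).reverse)
    (hil : i ≤ l) (hlr : l ≤ r) (hc : l + r = i + j - 1) :
    PySem.List.pyGetD s l ' ' = PySem.List.pyGetD s r ' ' := by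
  have hlj : l < j := by omega
  have hrj : r < j := by omega
  have hln : l.toNat < s.length := by omega
  have hrn : r.toNat < s.length := by omega
  have hlen := islice_length s i j h0 (by omega) hj
  have e1 : (islice s i j)[l.toNat - i.toNat]? = s[l.toNat]? := by
    rw [islice_getElem? s i j h0 (by omega) _ (by omega)]
    congr 1
    omega
  have e2 : (islice s i j)[r.toNat - i.toNat]? = s[r.toNat]? := by
    rw [islice_getElem? s i j h0 (by omega) _ (by omega)]
    congr 1
    omega
  have e3 : (islice s i j)[l.toNat - i.toNat]? = (islice s i j)[r.toNat - i.toNat]? :=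
    pal_getElem? _ hpal _ _ (by omega)
  have e4 : s[l.toNat]? = s[r.toNat]? := by rw [← e1, e3, e2]
  rw [List.getElem?_eq_getElem hln, List.getElem?_eq_getElem hrn] at e4
  rw [PySem.List.pyGetD_eq_getElem s ' ' (by omega) (by omega),
      PySem.List.pyGetD_eq_getElem s ' ' (by omega) (by omega)]
  exact Option.some.inj e4

-- completeness: the expansion chain from the center reaches every palindromic substring
lemma produced_reach (s : List Char) (i j l r : Int)
    (hij : i + 2 ≤ j) (h0 : 0 ≤ i) (hj : j ≤ (s.length : Int))
    (hpal : islice s i j = (islice s i j).reverse)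
    (hil : i ≤ l) (hlr : l ≤ r) (hc : l + r = i + j - 1) :
    islice s i j ∈ pvProduced s l r := by
  rw [pvProduced]
  have hg : 0 ≤ l ∧ r < (s.length : Int) ∧ PySem.List.pyGetD s l ' ' = PySem.List.pyGetD s r ' ' :=
    ⟨by omega, by omega, pal_sym s i j l r hij h0 hj hpal hil hlr hc⟩
  rw [if_pos hg]
  rcases eq_or_lt_of_le hil with heq | hlt
  · have hlr' : l < r := by omega
    rw [if_pos hlr']
    apply List.mem_append.2
    left
    rw [List.mem_singleton]
    have hj' : r + 1 = j := by omega
    rw [← heq, hj']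
    rfl
  · apply List.mem_append.2
    right
    exact produced_reach s i j (l - 1) (r + 1) hij h0 hj hpal (by omega) (by omega) (by omega)
termination_by (l - i).toNat
decreasing_by omega

-- membership in B's flattened candidate stream
lemma memB (s : List Char) (x : List Char) :
    x ∈ (PySem.List.pyRange 0 (2 * (s.length : Int) - 1) 1).flatMap (fun c =>
        pvProduced s (PySem.Int.floordiv c 2) (PySem.Int.floordiv c 2 + PySem.Int.mod c 2))
    ↔ isCand s x := by
  rw [List.mem_flatMap]
  constructor
  · rintro ⟨c, hc, hx⟩
    rw [PySem.List.mem_pyRange_one] at hc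
    rw [PySem.Int.floordiv_eq_ediv_of_pos (by norm_num : (0:Int) < 2),
        PySem.Int.mod_eq_emod_of_pos (by norm_num : (0:Int) < 2)] at hx
    refine produced_sound s (c / 2) (c / 2 + c % 2) (by omega) (by omega) (by omega) ?_ x hx
    rw [islice_empty s (c / 2 + 1) (c / 2 + c % 2) (by omega) (by omega) (by omega)]
    rfl
  · intro hx
    obtain ⟨i, j, h0, hij, hj, hrep⟩ := cand_rep s x hx
    refine ⟨i + j - 1, ?_, ?_⟩
    · rw [PySem.List.mem_pyRange_one]
      omega
    · rw [PySem.Int.floordiv_eq_ediv_of_pos (by norm_num : (0:Int) < 2),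
          PySem.Int.mod_eq_emod_of_pos (by norm_num : (0:Int) < 2), ← hrep]
      exact produced_reach s i j ((i + j - 1) / 2) ((i + j - 1) / 2 + (i + j - 1) % 2)
        hij h0 hj (by rw [hrep]; exact hx.1) (by omega) (by omega) (by omega)

-- the two ports agree on the char list of the input
lemma ports_agree (s : List Char) :
    (if ((PySem.List.pyRange 0 (s.length : Int) 1).foldl (fun acc i =>
      (PySem.List.pyRange (i + 1) ((s.length : Int) + 1) 1).foldl (fun acc2 j =>
        if (islice s i j) = (islice s i j).reverse ∧ 1 < (islice s i j).length
        then acc2 ++ [islice s i j] else acc2) acc) []).length < 1 then "Error"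
     else
       match PySem.List.min? ((PySem.List.pyRange 0 (s.length : Int) 1).foldl (fun acc i =>
         (PySem.List.pyRange (i + 1) ((s.length : Int) + 1) 1).foldl (fun acc2 j =>
           if (islice s i j) = (islice s i j).reverse ∧ 1 < (islice s i j).length
           then acc2 ++ [islice s i j] else acc2) acc) []) (fun x => x) with
       | some m => String.ofList m
       | none => "Error")
    = match (PySem.List.pyRange 0 (2 * (s.length : Int) - 1) 1).foldl (fun best c =>
        pvExpand s (PySem.Int.floordiv c 2) (PySem.Int.floordiv c 2 + PySem.Int.mod c 2) best) none with
      | some b => String.ofList b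
      | none => "Error" := by
  have hB1 : (PySem.List.pyRange 0 (2 * (s.length : Int) - 1) 1).foldl (fun best c =>
        pvExpand s (PySem.Int.floordiv c 2) (PySem.Int.floordiv c 2 + PySem.Int.mod c 2) best) none
      = PySem.List.min? ((PySem.List.pyRange 0 (2 * (s.length : Int) - 1) 1).flatMap (fun c =>
          pvProduced s (PySem.Int.floordiv c 2) (PySem.Int.floordiv c 2 + PySem.Int.mod c 2))) (fun y => y) := by
    rw [List.foldl_ext _ (fun (b : Option (List Char)) (c : Int) =>
          ((fun c => pvProduced s (PySem.Int.floordiv c 2) (PySem.Int.floordiv c 2 + PySem.Int.mod c 2)) c).foldl pvStep b)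
        none (fun b c _ => pvExpand_eq_foldl s _ _ b), foldl_flat, foldl_pvStep_none_eq_min?]
  have hcongr := min?_congr_mem _ _ (fun x => (memB s x).trans ((memA s x).symm))
  rw [hB1, hcongr]
  cases hmin : PySem.List.min? ((PySem.List.pyRange 0 (s.length : Int) 1).foldl (fun acc i =>
      (PySem.List.pyRange (i + 1) ((s.length : Int) + 1) 1).foldl (fun acc2 j =>
        if (islice s i j) = (islice s i j).reverse ∧ 1 < (islice s i j).length
        then acc2 ++ [islice s i j] else acc2) acc) []) (fun y => y) with
  | none =>
    have hnil := (PySem.List.min?_eq_none_iff _ _).1 hmin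
    simp [hnil]
  | some m =>
    have hmem := PySem.List.min?_mem hmin
    have hlen : ¬ (((PySem.List.pyRange 0 (s.length : Int) 1).foldl (fun acc i =>
      (PySem.List.pyRange (i + 1) ((s.length : Int) + 1) 1).foldl (fun acc2 j =>
        if (islice s i j) = (islice s i j).reverse ∧ 1 < (islice s i j).length
        then acc2 ++ [islice s i j] else acc2) acc) []).length < 1) := by
      have := List.length_pos_of_mem hmem
      omega
    rw [if_neg hlen]

-- ===== VERDICT (by name: the statement is the Claim_ definition above) =====
theorem find_palindromic_substring_spec : Claim_equal_find_palindromic_substring := by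
  intro name _
  show find_palindromic_substring name = find_palindromic_substring_alt name
  exact ports_agree name.toList
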